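-- pv_equiv track=rewrite | github.com/Ashrockzzz2003/IITM_CodeChef | IITMPD3PP01/average_flex.py | count_boast
-- ===== SOURCE A (Python) =====
-- def count_boast(A):
--     count = 0
--     for i in range(len(A)):
--         greater_than_ai = []
--         for j in range(len(A)):
--             if (i != j):
--                 if(A[j] > A[i]):
--                     greater_than_ai.append(1)
--         if (len(A) - len(greater_than_ai) - 1) >= (len(greater_than_ai)):
--             count += 1
--
--     return count
-- ===== SOURCE B (Python) =====
-- def count_boast(A):
--     # An element qualifies iff (# strictly greater) <= (n-1)//2, which for a
--     # sorted copy s means the element is >= s[n//2]. One sort, one pass.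
--     n = len(A)
--     if n == 0:
--         return 0
--     pivot = sorted(A)[n // 2]
--     return sum(1 for x in A if x >= pivot)
-- ===== Notes on version B (the rewrite author's own statement) =====
-- stated objective: faster
-- what changed: Replaced the quadratic per-element scan by one sort: an element qualifies iff it is >= the sorted list's element at index n//2, so B sorts once and counts elements >= that pivot.
import Mathlib
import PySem

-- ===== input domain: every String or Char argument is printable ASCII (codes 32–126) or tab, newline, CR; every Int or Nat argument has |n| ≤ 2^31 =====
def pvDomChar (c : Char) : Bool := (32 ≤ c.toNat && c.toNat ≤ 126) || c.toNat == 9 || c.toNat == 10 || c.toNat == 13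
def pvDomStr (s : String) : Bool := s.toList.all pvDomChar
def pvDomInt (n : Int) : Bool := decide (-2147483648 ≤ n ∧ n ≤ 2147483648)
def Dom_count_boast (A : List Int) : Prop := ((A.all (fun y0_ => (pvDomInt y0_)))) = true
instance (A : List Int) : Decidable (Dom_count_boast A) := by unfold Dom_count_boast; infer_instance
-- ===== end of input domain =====

-- B replaces A's quadratic per-element scan by one sort and a single pass (count of elements ≥ sorted[n//2]); objective: faster.

-- ===== PORT A =====
-- Literal port of A: indices always lie in range(len(A)), so pyGetD's default is never used (exact).
def count_boast (A : List Int) : Int :=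
  (PySem.List.pyRange 0 (A.length : Int) 1).foldl (fun count i =>
    let greater_than_ai :=
      (PySem.List.pyRange 0 (A.length : Int) 1).foldl (fun acc j =>
        if i ≠ j then
          (if PySem.List.pyGetD A j 0 > PySem.List.pyGetD A i 0 then acc ++ [(1 : Int)] else acc)
        else acc) ([] : List Int)
    if (A.length : Int) - (greater_than_ai.length : Int) - 1 ≥ (greater_than_ai.length : Int)
    then count + 1 else count) 0

-- ===== PORT B =====
-- Literal port of Source B: sorted(A)[n//2] is in range since n ≠ 0 (pyGetD default never used, exact);
-- sum(1 for x in A if x >= pivot) is the foldl.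
def count_boast_alt (A : List Int) : Int :=
  let n := A.length
  if n = 0 then 0
  else
    let pivot := PySem.List.pyGetD (PySem.List.sorted A (fun v => v) false) ((n / 2 : Nat) : Int) 0
    A.foldl (fun c x => if x ≥ pivot then c + 1 else c) 0

-- ===== PRECONDITION & SPEC =====
def Spec_count_boast (A : List Int) (out : Int) : Prop := out = count_boast_alt A
instance (A : List Int) (out : Int) : Decidable (Spec_count_boast A out) := by unfold Spec_count_boast; infer_instance

-- ===== CLAIM (what is proved, stated in full; the proofs are below) =====
def Claim_equal_count_boast : Prop := ∀ (A : List Int), Dom_count_boast A → Spec_count_boast A (count_boast A)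

-- ===== LEMMAS AND PROOFS =====

-- In a ≤-sorted list, s[k] ≤ x iff more than k elements are ≤ x.
theorem sorted_le_iff_lt_countP (s : List Int) (hp : s.Pairwise (· ≤ ·))
    (k : Nat) (hk : k < s.length) (x : Int) :
    s[k] ≤ x ↔ k < s.countP (fun y => decide (y ≤ x)) := by
  induction s generalizing k with
  | nil => simp at hk
  | cons a t ih =>
    rcases List.pairwise_cons.mp hp with ⟨ha, ht⟩
    cases k with
    | zero =>
      simp only [List.getElem_cons_zero, List.countP_cons]
      by_cases hax : a ≤ x
      · simp [hax]
      · have h0 : t.countP (fun y => decide (y ≤ x)) = 0 := by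
          apply List.countP_eq_zero.mpr
          intro y hy
          have := ha y hy
          simp only [decide_eq_true_eq]
          omega
        simp [hax, h0]
    | succ k =>
      have hk' : k < t.length := by simpa using hk
      have hrec := ih ht k hk' 
      simp only [List.getElem_cons_succ, List.countP_cons]
      by_cases hax : a ≤ x
      · simp only [hax, decide_true, if_true]
        rw [hrec]
        omega
      · have h0 : t.countP (fun y => decide (y ≤ x)) = 0 := by
          apply List.countP_eq_zero.mpr
          intro y hy
          have := ha y hy
          simp only [decide_eq_true_eq]
          omega
        have hfalse : ¬ t[k] ≤ x := by
          have := ha t[k] (t.getElem_mem hk')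
          omega
        rw [h0]
        simp [hax, hfalse]

-- complement counts
theorem countP_le_add_countP_lt (A : List Int) (x : Int) :
    A.countP (fun y => decide (y ≤ x)) + A.countP (fun y => decide (x < y)) = A.length := by
  have h := List.length_eq_countP_add_countP (l := A) (p := fun y => decide (y ≤ x))
  have he : (fun (a : Int) => decide ¬(decide (a ≤ x) = true)) = (fun y => decide (x < y)) := by
    funext y
    by_cases hy : y ≤ x
    · simp [hy]
    · simp [hy]
      omega
  rw [h, he]

-- A's per-element condition is "x ≥ sorted(A)[n//2]".
theorem cond_iff (A : List Int) (hA : A ≠ []) (x : Int) :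
    ((A.length : Int) - (A.countP (fun y => decide (x < y)) : Int) - 1
        ≥ (A.countP (fun y => decide (x < y)) : Int))
    ↔ PySem.List.pyGetD (PySem.List.sorted A (fun v => v) false) ((A.length / 2 : Nat) : Int) 0 ≤ x := by
  have hperm : (PySem.List.sorted A (fun v => v) false).Perm A := PySem.List.sorted_perm A _ _
  have hlen : (PySem.List.sorted A (fun v => v) false).length = A.length := hperm.length_eq
  have hpos : 0 < A.length := List.length_pos_iff.mpr hA
  have hk : A.length / 2 < (PySem.List.sorted A (fun v => v) false).length := by omega
  have hget : PySem.List.pyGetD (PySem.List.sorted A (fun v => v) false) ((A.length / 2 : Nat) : Int) 0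
      = (PySem.List.sorted A (fun v => v) false)[A.length / 2] := by
    rw [PySem.List.pyGetD_natCast, List.getD_eq_getElem]
  have hpair : (PySem.List.sorted A (fun v => v) false).Pairwise (· ≤ ·) := by
    have := PySem.List.sorted_pairwise (xs := A) (key := fun v => v)
    simpa using this
  have hiff := sorted_le_iff_lt_countP _ hpair (A.length / 2) hk x
  have hcp : (PySem.List.sorted A (fun v => v) false).countP (fun y => decide (y ≤ x))
      = A.countP (fun y => decide (y ≤ x)) := hperm.countP_eq _
  have hsum := countP_le_add_countP_lt A x
  rw [hget, hiff, hcp]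
  omega

-- ===== VERDICT (by name: the statement is the Claim_ definition above) =====
theorem count_boast_spec : Claim_equal_count_boast := by
  unfold Claim_equal_count_boast
  intro A _
  unfold Spec_count_boast count_boast count_boast_alt
  by_cases hA : A = []
  · subst hA
    simp [PySem.List.pyRange]
  · have hn : A.length ≠ 0 := fun h => hA (List.length_eq_zero_iff.mp h)
    simp only [hn, if_false]
    have inner_eq : ∀ i : Int,
        ((PySem.List.pyRange 0 (A.length : Int) 1).foldl (fun acc j =>
          if i ≠ j then
            (if PySem.List.pyGetD A j 0 > PySem.List.pyGetD A i 0 then acc ++ [(1 : Int)] else acc)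
          else acc) ([] : List Int))
        = (A.filter (fun y => decide (PySem.List.pyGetD A i 0 < y))).map (fun _ => (1 : Int)) := by
      intro i
      have hfun : (fun (acc : List Int) (j : Int) =>
          if i ≠ j then
            (if PySem.List.pyGetD A j 0 > PySem.List.pyGetD A i 0 then acc ++ [(1 : Int)] else acc)
          else acc)
          = (fun (acc : List Int) (j : Int) =>
              if PySem.List.pyGetD A i 0 < PySem.List.pyGetD A j 0 then acc ++ [(1 : Int)] else acc) := by
        funext acc j
        by_cases h : i = j
        · subst h; simp
        · simp [h, GT.gt]
      rw [hfun]
      rw [PySem.List.foldl_pyRange_zero_pyGetD' A 0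
        (fun (acc : List Int) (y : Int) => if PySem.List.pyGetD A i 0 < y then acc ++ [(1 : Int)] else acc) ([] : List Int)]
      rw [PySem.List.foldl_append_ite (p := fun y => PySem.List.pyGetD A i 0 < y) (f := fun _ => (1 : Int))]
      simp
    simp only [inner_eq, List.length_map, ← List.countP_eq_length_filter]
    rw [PySem.List.foldl_pyRange_zero_pyGetD' A 0
      (fun (count : Int) (x : Int) =>
        if (A.length : Int) - (A.countP (fun y => decide (x < y)) : Int) - 1
            ≥ (A.countP (fun y => decide (x < y)) : Int) then count + 1 else count) 0]
    apply PySem.List.foldl_congr_mem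
    intro acc x _
    have h := cond_iff A hA x
    by_cases hc : (A.length : Int) - (A.countP (fun y => decide (x < y)) : Int) - 1
        ≥ (A.countP (fun y => decide (x < y)) : Int)
    · rw [if_pos hc, if_pos (h.mp hc)]
    · rw [if_neg hc, if_neg (fun hx => hc (h.mpr hx))]
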